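-- pv_equiv track=rewrite | github.com/guptaanshik1/DSA-python | recursion/subsequences.py | __helperAsciiRet
-- ===== SOURCE A (Python) =====
-- def __helperAsciiRet(p, up):
--     if up == "":
--         ans = []
--         ans.append(p)
--         return ans
--
--     ch = up[0]
--     firstCall = __helperAsciiRet(p + ch, up[1:])
--     secondCall = __helperAsciiRet(p + str(ord(ch)), up[1:])
--     thirdCall = __helperAsciiRet(p, up[1:])
--     firstCall.extend(secondCall)
--     firstCall.extend(thirdCall)
--     return firstCall
-- ===== SOURCE B (Python) =====
-- def __helperAsciiRet(p, up):
--     results = [p]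
--     for ch in up:
--         code = str(ord(ch))
--         results = [x for r in results for x in (r + ch, r + code, r)]
--     return results
-- ===== Notes on version B (the rewrite author's own statement) =====
-- stated objective: alternative
-- what changed: Replaces the triple recursion with a single left-to-right loop over the characters that expands a running list of prefixes by the three keep/ascii/drop variants.
import Mathlib
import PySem

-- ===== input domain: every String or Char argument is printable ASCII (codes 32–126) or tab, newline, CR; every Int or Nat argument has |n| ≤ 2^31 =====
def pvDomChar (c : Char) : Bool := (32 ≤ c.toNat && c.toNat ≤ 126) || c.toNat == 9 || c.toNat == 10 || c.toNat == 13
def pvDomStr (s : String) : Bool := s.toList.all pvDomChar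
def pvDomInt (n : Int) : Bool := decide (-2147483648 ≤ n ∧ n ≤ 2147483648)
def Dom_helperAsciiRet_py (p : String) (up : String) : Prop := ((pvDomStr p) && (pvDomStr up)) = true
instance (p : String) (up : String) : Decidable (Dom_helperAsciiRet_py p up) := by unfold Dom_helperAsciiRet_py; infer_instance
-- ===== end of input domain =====

-- B replaces A's triple recursion by one iterative left-to-right expansion of a prefix list (alternative decomposition, same output).

-- ===== PORT A =====
-- A's recursion, over List Char (strings handled exactly via their character lists; str(ord(ch)) = PySem.Int.toChars)
def helperAsciiRetCore (p : List Char) (up : List Char) : List (List Char) :=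
  match up with
  | [] => [p]
  | ch :: rest =>
    let firstCall := helperAsciiRetCore (p ++ [ch]) rest
    let secondCall := helperAsciiRetCore (p ++ PySem.Int.toChars (ch.toNat : Int)) rest
    let thirdCall := helperAsciiRetCore p rest
    firstCall ++ secondCall ++ thirdCall

def helperAsciiRet_py (p : String) (up : String) : List String :=
  (helperAsciiRetCore p.toList up.toList).map String.mk

-- ===== PORT B =====
-- B's loop: results := [p]; each character expands every prefix r into r+ch, r+str(ord(ch)), r
def helperAsciiRetStep (acc : List (List Char)) (ch : Char) : List (List Char) :=
  acc.flatMap (fun r => [r ++ [ch], r ++ PySem.Int.toChars (ch.toNat : Int), r])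

def helperAsciiRet_py_alt (p : String) (up : String) : List String :=
  (up.toList.foldl helperAsciiRetStep [p.toList]).map String.mk

-- ===== PRECONDITION & SPEC =====
def Spec_helperAsciiRet_py (p : String) (up : String) (out : List String) : Prop := out = helperAsciiRet_py_alt p up
instance (p : String) (up : String) (out : List String) : Decidable (Spec_helperAsciiRet_py p up out) := by unfold Spec_helperAsciiRet_py; infer_instance

-- ===== CLAIM (what is proved, stated in full; the proofs are below) =====
def Claim_equal_helperAsciiRet_py : Prop := ∀ (p : String) (up : String), Dom_helperAsciiRet_py p up → Spec_helperAsciiRet_py p up (helperAsciiRet_py p up)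

-- ===== LEMMAS AND PROOFS =====

-- loop invariant: folding B's step over any prefix list acc enumerates A's recursion from each prefix
theorem foldl_step_flatMap (up : List Char) (acc : List (List Char)) :
    up.foldl helperAsciiRetStep acc = acc.flatMap (fun r => helperAsciiRetCore r up) := by
  induction up generalizing acc with
  | nil => simp [helperAsciiRetCore]
  | cons ch rest ih =>
    simp only [List.foldl_cons, ih]
    simp [helperAsciiRetStep, helperAsciiRetCore, List.flatMap_assoc, List.flatMap_cons, List.flatMap_nil, List.append_assoc]

theorem core_eq_fold (p up : List Char) :
    helperAsciiRetCore p up = up.foldl helperAsciiRetStep [p] := by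
  simp [foldl_step_flatMap]

-- ===== VERDICT (by name: the statement is the Claim_ definition above) =====
theorem helperAsciiRet_py_spec : Claim_equal_helperAsciiRet_py := by
  intro p up _
  unfold Spec_helperAsciiRet_py helperAsciiRet_py helperAsciiRet_py_alt
  rw [core_eq_fold]
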